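-- pv_equiv track=rewrite | github.com/sivaadityacoder/cyber_llm | process_complete_nvd_dataset.py | categorize_vulnerability
-- ===== SOURCE A (Python) =====
-- from typing import Dict, List, Any
--
-- def categorize_vulnerability(description: str, cwes: List[str]) -> str:
--     """Categorize vulnerability based on description and CWEs"""
--     desc_lower = description.lower()
--
--     # CWE-based categorization
--     cwe_categories = {
--         'Injection': ['CWE-89', 'CWE-79', 'CWE-77', 'CWE-78', 'CWE-91', 'CWE-564'],
--         'Authentication': ['CWE-287', 'CWE-306', 'CWE-798', 'CWE-521', 'CWE-620'],
--         'Authorization': ['CWE-285', 'CWE-862', 'CWE-863', 'CWE-269', 'CWE-284'],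
--         'Buffer Overflow': ['CWE-120', 'CWE-119', 'CWE-121', 'CWE-122', 'CWE-787'],
--         'Information Disclosure': ['CWE-200', 'CWE-209', 'CWE-215', 'CWE-532', 'CWE-538'],
--         'Cryptographic': ['CWE-327', 'CWE-328', 'CWE-330', 'CWE-331', 'CWE-347'],
--         'Input Validation': ['CWE-20', 'CWE-74', 'CWE-129', 'CWE-190', 'CWE-22'],
--         'Race Condition': ['CWE-362', 'CWE-367', 'CWE-364', 'CWE-366', 'CWE-368'],
--         'Memory Management': ['CWE-401', 'CWE-402', 'CWE-404', 'CWE-415', 'CWE-416']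
--     }
--
--     for category, cwe_list in cwe_categories.items():
--         if any(cwe in cwes for cwe in cwe_list):
--             return category
--
--     # Description-based categorization
--     if any(term in desc_lower for term in ['sql injection', 'sqli', 'sql inject']):
--         return 'SQL Injection'
--     elif any(term in desc_lower for term in ['cross-site scripting', 'xss']):
--         return 'Cross-Site Scripting'
--     elif any(term in desc_lower for term in ['buffer overflow', 'buffer overrun']):
--         return 'Buffer Overflow'
--     elif any(term in desc_lower for term in ['denial of service', 'dos', 'crash']):
--         return 'Denial of Service'
--     elif any(term in desc_lower for term in ['remote code execution', 'rce', 'code execution']):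
--         return 'Remote Code Execution'
--     elif any(term in desc_lower for term in ['privilege escalation', 'elevation']):
--         return 'Privilege Escalation'
--     elif any(term in desc_lower for term in ['information disclosure', 'information leak']):
--         return 'Information Disclosure'
--     elif any(term in desc_lower for term in ['authentication', 'login', 'credential']):
--         return 'Authentication'
--     elif any(term in desc_lower for term in ['directory traversal', 'path traversal']):
--         return 'Directory Traversal'
--     elif any(term in desc_lower for term in ['command injection', 'shell injection']):
--         return 'Command Injection'
--     else:
--         return 'Other Vulnerability'
-- ===== SOURCE B (Python) =====
-- # B: inverted-index + argmin selection. Instead of scanning rule groups in order and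
-- # returning on the first hit (A), B builds an index mapping each CWE code / keyword to
-- # its (priority, category) and returns the minimum-priority match: the CWE phase is a
-- # single pass over the INPUT list with dict lookups, the keyword phase an argmin fold.
--
-- CATS = [
--     ('Injection', ['CWE-89', 'CWE-79', 'CWE-77', 'CWE-78', 'CWE-91', 'CWE-564']),
--     ('Authentication', ['CWE-287', 'CWE-306', 'CWE-798', 'CWE-521', 'CWE-620']),
--     ('Authorization', ['CWE-285', 'CWE-862', 'CWE-863', 'CWE-269', 'CWE-284']),
--     ('Buffer Overflow', ['CWE-120', 'CWE-119', 'CWE-121', 'CWE-122', 'CWE-787']),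
--     ('Information Disclosure', ['CWE-200', 'CWE-209', 'CWE-215', 'CWE-532', 'CWE-538']),
--     ('Cryptographic', ['CWE-327', 'CWE-328', 'CWE-330', 'CWE-331', 'CWE-347']),
--     ('Input Validation', ['CWE-20', 'CWE-74', 'CWE-129', 'CWE-190', 'CWE-22']),
--     ('Race Condition', ['CWE-362', 'CWE-367', 'CWE-364', 'CWE-366', 'CWE-368']),
--     ('Memory Management', ['CWE-401', 'CWE-402', 'CWE-404', 'CWE-415', 'CWE-416']),
-- ]
--
-- KW_GROUPS = [
--     ('SQL Injection', ['sql injection', 'sqli', 'sql inject']),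
--     ('Cross-Site Scripting', ['cross-site scripting', 'xss']),
--     ('Buffer Overflow', ['buffer overflow', 'buffer overrun']),
--     ('Denial of Service', ['denial of service', 'dos', 'crash']),
--     ('Remote Code Execution', ['remote code execution', 'rce', 'code execution']),
--     ('Privilege Escalation', ['privilege escalation', 'elevation']),
--     ('Information Disclosure', ['information disclosure', 'information leak']),
--     ('Authentication', ['authentication', 'login', 'credential']),
--     ('Directory Traversal', ['directory traversal', 'path traversal']),
--     ('Command Injection', ['command injection', 'shell injection']),
-- ]
--
-- # inverted index: CWE code -> (priority, category); codes are pairwise distinct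
-- CODE_INDEX = {code: (i, cat) for i, (cat, codes) in enumerate(CATS) for code in codes}
-- # flat keyword index: (term, priority, category), priorities follow the rule order
-- KEYWORD_INDEX = [(term, i, cat) for i, (cat, terms) in enumerate(KW_GROUPS) for term in terms]
--
--
-- def categorize_vulnerability(description, cwes):
--     best = None
--     for c in cwes:
--         hit = CODE_INDEX.get(c)
--         if hit is not None and (best is None or hit[0] < best[0]):
--             best = hit
--     if best is not None:
--         return best[1]
--     dl = description.lower()
--     best = None
--     for term, prio, cat in KEYWORD_INDEX:
--         if (best is None or prio < best[0]) and term in dl: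
--             best = (prio, cat)
--     return best[1] if best is not None else 'Other Vulnerability'
-- ===== Notes on version B (the rewrite author's own statement) =====
-- stated objective: alternative
-- what changed: Replaces A's ordered first-match scan of rule groups (9-category dict loop plus 10-branch elif chain) by an inverted index: each CWE code and keyword is mapped to a (priority, category) pair, the CWE phase is one pass over the input list with dict lookups keeping the minimum-priority hit, and the keyword phase is an argmin fold over a flat term index.
import Mathlib
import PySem

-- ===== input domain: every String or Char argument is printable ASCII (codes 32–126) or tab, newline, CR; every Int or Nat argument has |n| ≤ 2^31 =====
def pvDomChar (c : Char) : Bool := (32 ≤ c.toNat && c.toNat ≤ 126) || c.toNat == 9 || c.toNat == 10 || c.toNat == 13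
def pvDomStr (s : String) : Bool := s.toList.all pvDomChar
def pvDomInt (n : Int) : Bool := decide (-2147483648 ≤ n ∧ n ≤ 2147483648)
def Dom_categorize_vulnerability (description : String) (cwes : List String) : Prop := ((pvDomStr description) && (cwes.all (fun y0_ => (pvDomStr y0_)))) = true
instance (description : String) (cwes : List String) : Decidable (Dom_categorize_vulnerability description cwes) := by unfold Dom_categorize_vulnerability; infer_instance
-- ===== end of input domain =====

-- B replaces A's ordered first-match scan of the rule groups by an inverted index
-- (code/term -> (priority, category)) and returns the minimum-priority match
-- (alternative decomposition; return value only, no mutation).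

-- ===== PORT A =====
-- the cwe_categories dict, as its insertion-ordered item list
def pvCweCategories : List (String × List String) :=
  [("Injection", ["CWE-89", "CWE-79", "CWE-77", "CWE-78", "CWE-91", "CWE-564"]),
   ("Authentication", ["CWE-287", "CWE-306", "CWE-798", "CWE-521", "CWE-620"]),
   ("Authorization", ["CWE-285", "CWE-862", "CWE-863", "CWE-269", "CWE-284"]),
   ("Buffer Overflow", ["CWE-120", "CWE-119", "CWE-121", "CWE-122", "CWE-787"]),
   ("Information Disclosure", ["CWE-200", "CWE-209", "CWE-215", "CWE-532", "CWE-538"]),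
   ("Cryptographic", ["CWE-327", "CWE-328", "CWE-330", "CWE-331", "CWE-347"]),
   ("Input Validation", ["CWE-20", "CWE-74", "CWE-129", "CWE-190", "CWE-22"]),
   ("Race Condition", ["CWE-362", "CWE-367", "CWE-364", "CWE-366", "CWE-368"]),
   ("Memory Management", ["CWE-401", "CWE-402", "CWE-404", "CWE-415", "CWE-416"])]

-- the 'for category, cwe_list in cwe_categories.items(): if any(...): return category' loop
def pvCweLoop (cwes : List String) : List (String × List String) → Option String
  | [] => none
  | (category, cwe_list) :: rest =>
    if cwe_list.any (fun cwe => cwes.contains cwe) then some category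
    else pvCweLoop cwes rest

def categorize_vulnerability (description : String) (cwes : List String) : String :=
  let desc_lower := PySem.Str.lower description
  match pvCweLoop cwes pvCweCategories with
  | some category => category
  | none =>
    if ["sql injection", "sqli", "sql inject"].any (fun t => PySem.Str.isIn t desc_lower) then "SQL Injection"
    else if ["cross-site scripting", "xss"].any (fun t => PySem.Str.isIn t desc_lower) then "Cross-Site Scripting"
    else if ["buffer overflow", "buffer overrun"].any (fun t => PySem.Str.isIn t desc_lower) then "Buffer Overflow"
    else if ["denial of service", "dos", "crash"].any (fun t => PySem.Str.isIn t desc_lower) then "Denial of Service"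
    else if ["remote code execution", "rce", "code execution"].any (fun t => PySem.Str.isIn t desc_lower) then "Remote Code Execution"
    else if ["privilege escalation", "elevation"].any (fun t => PySem.Str.isIn t desc_lower) then "Privilege Escalation"
    else if ["information disclosure", "information leak"].any (fun t => PySem.Str.isIn t desc_lower) then "Information Disclosure"
    else if ["authentication", "login", "credential"].any (fun t => PySem.Str.isIn t desc_lower) then "Authentication"
    else if ["directory traversal", "path traversal"].any (fun t => PySem.Str.isIn t desc_lower) then "Directory Traversal"
    else if ["command injection", "shell injection"].any (fun t => PySem.Str.isIn t desc_lower) then "Command Injection"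
    else "Other Vulnerability"

-- ===== PORT B =====
-- module-level tables of Source B
def pvBCats : List (String × List String) :=
  [("Injection", ["CWE-89", "CWE-79", "CWE-77", "CWE-78", "CWE-91", "CWE-564"]),
   ("Authentication", ["CWE-287", "CWE-306", "CWE-798", "CWE-521", "CWE-620"]),
   ("Authorization", ["CWE-285", "CWE-862", "CWE-863", "CWE-269", "CWE-284"]),
   ("Buffer Overflow", ["CWE-120", "CWE-119", "CWE-121", "CWE-122", "CWE-787"]),
   ("Information Disclosure", ["CWE-200", "CWE-209", "CWE-215", "CWE-532", "CWE-538"]),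
   ("Cryptographic", ["CWE-327", "CWE-328", "CWE-330", "CWE-331", "CWE-347"]),
   ("Input Validation", ["CWE-20", "CWE-74", "CWE-129", "CWE-190", "CWE-22"]),
   ("Race Condition", ["CWE-362", "CWE-367", "CWE-364", "CWE-366", "CWE-368"]),
   ("Memory Management", ["CWE-401", "CWE-402", "CWE-404", "CWE-415", "CWE-416"])]

def pvKwGroups : List (String × List String) :=
  [("SQL Injection", ["sql injection", "sqli", "sql inject"]),
   ("Cross-Site Scripting", ["cross-site scripting", "xss"]),
   ("Buffer Overflow", ["buffer overflow", "buffer overrun"]),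
   ("Denial of Service", ["denial of service", "dos", "crash"]),
   ("Remote Code Execution", ["remote code execution", "rce", "code execution"]),
   ("Privilege Escalation", ["privilege escalation", "elevation"]),
   ("Information Disclosure", ["information disclosure", "information leak"]),
   ("Authentication", ["authentication", "login", "credential"]),
   ("Directory Traversal", ["directory traversal", "path traversal"]),
   ("Command Injection", ["command injection", "shell injection"])]

-- CODE_INDEX = {code: (i, cat) for i, (cat, codes) in enumerate(CATS) for code in codes}
-- (all 46 codes are pairwise distinct, so first-match lookup on the pair list is the dict)
def pvCodeIndex : List (String × Int × String) :=
  (PySem.List.enumerate pvBCats).flatMap (fun p => p.2.2.map (fun code => (code, p.1, p.2.1)))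

-- KEYWORD_INDEX = [(term, i, cat) for i, (cat, terms) in enumerate(KW_GROUPS) for term in terms]
def pvKwIndex : List (String × Int × String) :=
  (PySem.List.enumerate pvKwGroups).flatMap (fun p => p.2.2.map (fun t => (t, p.1, p.2.1)))

-- the CWE-phase loop body: keep the minimum-priority index hit
def pvCweStep (best : Option (Int × String)) (c : String) : Option (Int × String) :=
  match List.lookup c pvCodeIndex with
  | none => best
  | some hit =>
    match best with
    | none => some hit
    | some b => if hit.1 < b.1 then some hit else best

-- the keyword-phase loop body: argmin over the flat term index
def pvKwStep (dl : String) (best : Option (Int × String)) (r : String × Int × String) : Option (Int × String) :=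
  if (match best with | none => true | some b => decide (r.2.1 < b.1)) && PySem.Str.isIn r.1 dl
  then some r.2 else best

def categorize_vulnerability_alt (description : String) (cwes : List String) : String :=
  let best := cwes.foldl pvCweStep none
  match best with
  | some b => b.2
  | none =>
    let dl := PySem.Str.lower description
    match pvKwIndex.foldl (pvKwStep dl) none with
    | some b => b.2
    | none => "Other Vulnerability"

-- ===== PRECONDITION & SPEC =====
def Spec_categorize_vulnerability (description : String) (cwes : List String) (out : String) : Prop := out = categorize_vulnerability_alt description cwes
instance (description : String) (cwes : List String) (out : String) : Decidable (Spec_categorize_vulnerability description cwes out) := by unfold Spec_categorize_vulnerability; infer_instance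

-- ===== CLAIM (what is proved, stated in full; the proofs are below) =====
def Claim_equal_categorize_vulnerability : Prop := ∀ (description : String) (cwes : List String), Dom_categorize_vulnerability description cwes → Spec_categorize_vulnerability description cwes (categorize_vulnerability description cwes)

-- ===== LEMMAS AND PROOFS =====

-- proof-only views of the code index
def pvKey (c : String) : Option Int := (List.lookup c pvCodeIndex).map (·.1)
def pvCatName (i : Int) : String := ((pvBCats.map Prod.fst).getD i.toNat "")
def pvCodesOf (i : Int) : List String := (pvBCats.getD i.toNat ("", [])).2

-- first-match lookup hits a member pair (not available under this shape in the library)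
theorem pv_lookup_mem {α β : Type} [BEq α] [LawfulBEq α] {l : List (α × β)} {a : α} {b : β}
    (h : List.lookup a l = some b) : (a, b) ∈ l := by
  induction l with
  | nil => simp [List.lookup] at h
  | cons hd tl ih =>
    obtain ⟨k, v⟩ := hd
    rw [List.lookup] at h
    by_cases hk : a == k
    · simp [hk] at h
      exact (beq_iff_eq.mp hk) ▸ h ▸ List.mem_cons_self
    · simp [hk] at h
      exact List.mem_cons_of_mem _ (ih h)

-- every index entry carries its category's position and name
theorem pvIdx_entries : ∀ e ∈ pvCodeIndex,
    e.2.2 = pvCatName e.2.1 ∧ 0 ≤ e.2.1 ∧ e.2.1 < 9 ∧ e.1 ∈ pvCodesOf e.2.1 := by decide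

theorem pvKeyChar (c : String) (j : Int) :
    pvKey c = some j ↔ (0 ≤ j ∧ j < 9 ∧ c ∈ pvCodesOf j) := by
  constructor
  · intro h
    unfold pvKey at h
    cases hl : List.lookup c pvCodeIndex with
    | none => simp [hl] at h
    | some p =>
      simp [hl] at h
      have := pvIdx_entries _ (pv_lookup_mem hl)
      exact ⟨h ▸ this.2.1, h ▸ this.2.2.1, h ▸ this.2.2.2⟩
  · rintro ⟨h0, h9, hm⟩
    have hj : j = 0 ∨ j = 1 ∨ j = 2 ∨ j = 3 ∨ j = 4 ∨ j = 5 ∨ j = 6 ∨ j = 7 ∨ j = 8 := by omega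
    rcases hj with rfl|rfl|rfl|rfl|rfl|rfl|rfl|rfl|rfl
    · simp [pvCodesOf, pvBCats] at hm
      rcases hm with rfl|rfl|rfl|rfl|rfl|rfl <;> decide
    · simp [pvCodesOf, pvBCats] at hm
      rcases hm with rfl|rfl|rfl|rfl|rfl <;> decide
    · simp [pvCodesOf, pvBCats] at hm
      rcases hm with rfl|rfl|rfl|rfl|rfl <;> decide
    · simp [pvCodesOf, pvBCats] at hm
      rcases hm with rfl|rfl|rfl|rfl|rfl <;> decide
    · simp [pvCodesOf, pvBCats] at hm
      rcases hm with rfl|rfl|rfl|rfl|rfl <;> decide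
    · simp [pvCodesOf, pvBCats] at hm
      rcases hm with rfl|rfl|rfl|rfl|rfl <;> decide
    · simp [pvCodesOf, pvBCats] at hm
      rcases hm with rfl|rfl|rfl|rfl|rfl <;> decide
    · simp [pvCodesOf, pvBCats] at hm
      rcases hm with rfl|rfl|rfl|rfl|rfl <;> decide
    · simp [pvCodesOf, pvBCats] at hm
      rcases hm with rfl|rfl|rfl|rfl|rfl <;> decide

theorem pvK_bounds (cwes : List String) : ∀ j ∈ cwes.filterMap pvKey, 0 ≤ j ∧ j < 9 := by
  intro j hj
  rcases List.mem_filterMap.1 hj with ⟨c, _, hc⟩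
  have := (pvKeyChar c j).1 hc
  exact ⟨this.1, this.2.1⟩

-- the B fold computes the key minimum, tagged with its category name
def pvMinStep (M : Option Int) (c : String) : Option Int :=
  match pvKey c with
  | none => M
  | some j => match M with | none => some j | some i => some (min i j)

theorem pvFoldA (cwes : List String) : ∀ (M : Option Int),
    cwes.foldl pvCweStep (M.map (fun i => (i, pvCatName i)))
      = (cwes.foldl pvMinStep M).map (fun i => (i, pvCatName i)) := by
  induction cwes with
  | nil => intro M; rfl
  | cons c rest ih =>
    intro M
    rw [List.foldl_cons, List.foldl_cons]
    have step : pvCweStep (M.map (fun i => (i, pvCatName i))) c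
        = (pvMinStep M c).map (fun i => (i, pvCatName i)) := by
      unfold pvCweStep pvMinStep pvKey
      cases hl : List.lookup c pvCodeIndex with
      | none => cases M <;> rfl
      | some p =>
        have hp := (pvIdx_entries _ (pv_lookup_mem hl)).1
        cases M with
        | none => simp [Option.map]; exact Prod.ext rfl hp
        | some i =>
          simp only [Option.map]
          by_cases hlt : p.1 < i
          · have h1 : min i p.1 = p.1 := by omega
            simp [hlt, h1]
            exact Prod.ext rfl hp
          · have h1 : min i p.1 = i := by omega
            simp [hlt, h1]
    rw [step, ih]

theorem pvFoldB (cwes : List String) : ∀ (M : Option Int),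
    cwes.foldl pvMinStep M = (M.toList ++ cwes.filterMap pvKey).min? := by
  induction cwes with
  | nil => intro M; cases M <;> simp [List.min?]
  | cons c rest ih =>
    intro M
    rw [List.foldl_cons]
    cases hk : pvKey c with
    | none => rw [List.filterMap_cons_none hk]; simp [pvMinStep, hk, ih]
    | some j =>
      rw [List.filterMap_cons_some hk]
      cases M with
      | none => simp [pvMinStep, hk, ih (some j)]
      | some i =>
        rw [show pvMinStep (some i) c = some (min i j) by simp [pvMinStep, hk]]
        rw [ih (some (min i j))]
        simp [List.min?]

-- A's CWE loop equals the minimum key's category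
set_option maxHeartbeats 2000000 in
theorem pvCweLoop_char (cwes : List String) :
    pvCweLoop cwes pvCweCategories = ((cwes.filterMap pvKey).min?).map pvCatName := by
  by_cases h0 : ((0 : Int)) ∈ cwes.filterMap pvKey
  · have hmin : (cwes.filterMap pvKey).min? = some 0 := by
      rw [List.min?_eq_some_iff]
      refine ⟨h0, fun j hj => ?_⟩
      have hb := pvK_bounds cwes j hj

      omega
    have hcond : "CWE-89" ∈ cwes ∨ "CWE-79" ∈ cwes ∨ "CWE-77" ∈ cwes ∨ "CWE-78" ∈ cwes ∨ "CWE-91" ∈ cwes ∨ "CWE-564" ∈ cwes := by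
      rcases List.mem_filterMap.1 h0 with ⟨c, hcw, hk⟩
      have hm := ((pvKeyChar c 0).1 hk).2.2
      simp [pvCodesOf, pvBCats] at hm
      rcases hm with rfl|rfl|rfl|rfl|rfl|rfl <;> tauto

    rw [hmin]
    simp [pvCweLoop, pvCweCategories, hcond, pvCatName, pvBCats]
  by_cases h1 : ((1 : Int)) ∈ cwes.filterMap pvKey
  · have hmin : (cwes.filterMap pvKey).min? = some 1 := by
      rw [List.min?_eq_some_iff]
      refine ⟨h1, fun j hj => ?_⟩
      have hb := pvK_bounds cwes j hj
      have ne0 : j ≠ 0 := fun e => h0 (e ▸ hj)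
      omega
    have hcond : "CWE-287" ∈ cwes ∨ "CWE-306" ∈ cwes ∨ "CWE-798" ∈ cwes ∨ "CWE-521" ∈ cwes ∨ "CWE-620" ∈ cwes := by
      rcases List.mem_filterMap.1 h1 with ⟨c, hcw, hk⟩
      have hm := ((pvKeyChar c 1).1 hk).2.2
      simp [pvCodesOf, pvBCats] at hm
      rcases hm with rfl|rfl|rfl|rfl|rfl <;> tauto
    have nc_CWE_89 : "CWE-89" ∉ cwes := fun hm => h0 (List.mem_filterMap.2 ⟨_, hm, by decide⟩)
    have nc_CWE_79 : "CWE-79" ∉ cwes := fun hm => h0 (List.mem_filterMap.2 ⟨_, hm, by decide⟩)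
    have nc_CWE_77 : "CWE-77" ∉ cwes := fun hm => h0 (List.mem_filterMap.2 ⟨_, hm, by decide⟩)
    have nc_CWE_78 : "CWE-78" ∉ cwes := fun hm => h0 (List.mem_filterMap.2 ⟨_, hm, by decide⟩)
    have nc_CWE_91 : "CWE-91" ∉ cwes := fun hm => h0 (List.mem_filterMap.2 ⟨_, hm, by decide⟩)
    have nc_CWE_564 : "CWE-564" ∉ cwes := fun hm => h0 (List.mem_filterMap.2 ⟨_, hm, by decide⟩)
    rw [hmin]
    simp [pvCweLoop, pvCweCategories, hcond, nc_CWE_89, nc_CWE_79, nc_CWE_77, nc_CWE_78, nc_CWE_91, nc_CWE_564, pvCatName, pvBCats]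
  by_cases h2 : ((2 : Int)) ∈ cwes.filterMap pvKey
  · have hmin : (cwes.filterMap pvKey).min? = some 2 := by
      rw [List.min?_eq_some_iff]
      refine ⟨h2, fun j hj => ?_⟩
      have hb := pvK_bounds cwes j hj
      have ne0 : j ≠ 0 := fun e => h0 (e ▸ hj)
      have ne1 : j ≠ 1 := fun e => h1 (e ▸ hj)
      omega
    have hcond : "CWE-285" ∈ cwes ∨ "CWE-862" ∈ cwes ∨ "CWE-863" ∈ cwes ∨ "CWE-269" ∈ cwes ∨ "CWE-284" ∈ cwes := by
      rcases List.mem_filterMap.1 h2 with ⟨c, hcw, hk⟩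
      have hm := ((pvKeyChar c 2).1 hk).2.2
      simp [pvCodesOf, pvBCats] at hm
      rcases hm with rfl|rfl|rfl|rfl|rfl <;> tauto
    have nc_CWE_89 : "CWE-89" ∉ cwes := fun hm => h0 (List.mem_filterMap.2 ⟨_, hm, by decide⟩)
    have nc_CWE_79 : "CWE-79" ∉ cwes := fun hm => h0 (List.mem_filterMap.2 ⟨_, hm, by decide⟩)
    have nc_CWE_77 : "CWE-77" ∉ cwes := fun hm => h0 (List.mem_filterMap.2 ⟨_, hm, by decide⟩)
    have nc_CWE_78 : "CWE-78" ∉ cwes := fun hm => h0 (List.mem_filterMap.2 ⟨_, hm, by decide⟩)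
    have nc_CWE_91 : "CWE-91" ∉ cwes := fun hm => h0 (List.mem_filterMap.2 ⟨_, hm, by decide⟩)
    have nc_CWE_564 : "CWE-564" ∉ cwes := fun hm => h0 (List.mem_filterMap.2 ⟨_, hm, by decide⟩)
    have nc_CWE_287 : "CWE-287" ∉ cwes := fun hm => h1 (List.mem_filterMap.2 ⟨_, hm, by decide⟩)
    have nc_CWE_306 : "CWE-306" ∉ cwes := fun hm => h1 (List.mem_filterMap.2 ⟨_, hm, by decide⟩)
    have nc_CWE_798 : "CWE-798" ∉ cwes := fun hm => h1 (List.mem_filterMap.2 ⟨_, hm, by decide⟩)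
    have nc_CWE_521 : "CWE-521" ∉ cwes := fun hm => h1 (List.mem_filterMap.2 ⟨_, hm, by decide⟩)
    have nc_CWE_620 : "CWE-620" ∉ cwes := fun hm => h1 (List.mem_filterMap.2 ⟨_, hm, by decide⟩)
    rw [hmin]
    simp [pvCweLoop, pvCweCategories, hcond, nc_CWE_89, nc_CWE_79, nc_CWE_77, nc_CWE_78, nc_CWE_91, nc_CWE_564, nc_CWE_287, nc_CWE_306, nc_CWE_798, nc_CWE_521, nc_CWE_620, pvCatName, pvBCats]
  by_cases h3 : ((3 : Int)) ∈ cwes.filterMap pvKey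
  · have hmin : (cwes.filterMap pvKey).min? = some 3 := by
      rw [List.min?_eq_some_iff]
      refine ⟨h3, fun j hj => ?_⟩
      have hb := pvK_bounds cwes j hj
      have ne0 : j ≠ 0 := fun e => h0 (e ▸ hj)
      have ne1 : j ≠ 1 := fun e => h1 (e ▸ hj)
      have ne2 : j ≠ 2 := fun e => h2 (e ▸ hj)
      omega
    have hcond : "CWE-120" ∈ cwes ∨ "CWE-119" ∈ cwes ∨ "CWE-121" ∈ cwes ∨ "CWE-122" ∈ cwes ∨ "CWE-787" ∈ cwes := by
      rcases List.mem_filterMap.1 h3 with ⟨c, hcw, hk⟩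
      have hm := ((pvKeyChar c 3).1 hk).2.2
      simp [pvCodesOf, pvBCats] at hm
      rcases hm with rfl|rfl|rfl|rfl|rfl <;> tauto
    have nc_CWE_89 : "CWE-89" ∉ cwes := fun hm => h0 (List.mem_filterMap.2 ⟨_, hm, by decide⟩)
    have nc_CWE_79 : "CWE-79" ∉ cwes := fun hm => h0 (List.mem_filterMap.2 ⟨_, hm, by decide⟩)
    have nc_CWE_77 : "CWE-77" ∉ cwes := fun hm => h0 (List.mem_filterMap.2 ⟨_, hm, by decide⟩)
    have nc_CWE_78 : "CWE-78" ∉ cwes := fun hm => h0 (List.mem_filterMap.2 ⟨_, hm, by decide⟩)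
    have nc_CWE_91 : "CWE-91" ∉ cwes := fun hm => h0 (List.mem_filterMap.2 ⟨_, hm, by decide⟩)
    have nc_CWE_564 : "CWE-564" ∉ cwes := fun hm => h0 (List.mem_filterMap.2 ⟨_, hm, by decide⟩)
    have nc_CWE_287 : "CWE-287" ∉ cwes := fun hm => h1 (List.mem_filterMap.2 ⟨_, hm, by decide⟩)
    have nc_CWE_306 : "CWE-306" ∉ cwes := fun hm => h1 (List.mem_filterMap.2 ⟨_, hm, by decide⟩)
    have nc_CWE_798 : "CWE-798" ∉ cwes := fun hm => h1 (List.mem_filterMap.2 ⟨_, hm, by decide⟩)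
    have nc_CWE_521 : "CWE-521" ∉ cwes := fun hm => h1 (List.mem_filterMap.2 ⟨_, hm, by decide⟩)
    have nc_CWE_620 : "CWE-620" ∉ cwes := fun hm => h1 (List.mem_filterMap.2 ⟨_, hm, by decide⟩)
    have nc_CWE_285 : "CWE-285" ∉ cwes := fun hm => h2 (List.mem_filterMap.2 ⟨_, hm, by decide⟩)
    have nc_CWE_862 : "CWE-862" ∉ cwes := fun hm => h2 (List.mem_filterMap.2 ⟨_, hm, by decide⟩)
    have nc_CWE_863 : "CWE-863" ∉ cwes := fun hm => h2 (List.mem_filterMap.2 ⟨_, hm, by decide⟩)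
    have nc_CWE_269 : "CWE-269" ∉ cwes := fun hm => h2 (List.mem_filterMap.2 ⟨_, hm, by decide⟩)
    have nc_CWE_284 : "CWE-284" ∉ cwes := fun hm => h2 (List.mem_filterMap.2 ⟨_, hm, by decide⟩)
    rw [hmin]
    simp [pvCweLoop, pvCweCategories, hcond, nc_CWE_89, nc_CWE_79, nc_CWE_77, nc_CWE_78, nc_CWE_91, nc_CWE_564, nc_CWE_287, nc_CWE_306, nc_CWE_798, nc_CWE_521, nc_CWE_620, nc_CWE_285, nc_CWE_862, nc_CWE_863, nc_CWE_269, nc_CWE_284, pvCatName, pvBCats]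
  by_cases h4 : ((4 : Int)) ∈ cwes.filterMap pvKey
  · have hmin : (cwes.filterMap pvKey).min? = some 4 := by
      rw [List.min?_eq_some_iff]
      refine ⟨h4, fun j hj => ?_⟩
      have hb := pvK_bounds cwes j hj
      have ne0 : j ≠ 0 := fun e => h0 (e ▸ hj)
      have ne1 : j ≠ 1 := fun e => h1 (e ▸ hj)
      have ne2 : j ≠ 2 := fun e => h2 (e ▸ hj)
      have ne3 : j ≠ 3 := fun e => h3 (e ▸ hj)
      omega
    have hcond : "CWE-200" ∈ cwes ∨ "CWE-209" ∈ cwes ∨ "CWE-215" ∈ cwes ∨ "CWE-532" ∈ cwes ∨ "CWE-538" ∈ cwes := by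
      rcases List.mem_filterMap.1 h4 with ⟨c, hcw, hk⟩
      have hm := ((pvKeyChar c 4).1 hk).2.2
      simp [pvCodesOf, pvBCats] at hm
      rcases hm with rfl|rfl|rfl|rfl|rfl <;> tauto
    have nc_CWE_89 : "CWE-89" ∉ cwes := fun hm => h0 (List.mem_filterMap.2 ⟨_, hm, by decide⟩)
    have nc_CWE_79 : "CWE-79" ∉ cwes := fun hm => h0 (List.mem_filterMap.2 ⟨_, hm, by decide⟩)
    have nc_CWE_77 : "CWE-77" ∉ cwes := fun hm => h0 (List.mem_filterMap.2 ⟨_, hm, by decide⟩)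
    have nc_CWE_78 : "CWE-78" ∉ cwes := fun hm => h0 (List.mem_filterMap.2 ⟨_, hm, by decide⟩)
    have nc_CWE_91 : "CWE-91" ∉ cwes := fun hm => h0 (List.mem_filterMap.2 ⟨_, hm, by decide⟩)
    have nc_CWE_564 : "CWE-564" ∉ cwes := fun hm => h0 (List.mem_filterMap.2 ⟨_, hm, by decide⟩)
    have nc_CWE_287 : "CWE-287" ∉ cwes := fun hm => h1 (List.mem_filterMap.2 ⟨_, hm, by decide⟩)
    have nc_CWE_306 : "CWE-306" ∉ cwes := fun hm => h1 (List.mem_filterMap.2 ⟨_, hm, by decide⟩)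
    have nc_CWE_798 : "CWE-798" ∉ cwes := fun hm => h1 (List.mem_filterMap.2 ⟨_, hm, by decide⟩)
    have nc_CWE_521 : "CWE-521" ∉ cwes := fun hm => h1 (List.mem_filterMap.2 ⟨_, hm, by decide⟩)
    have nc_CWE_620 : "CWE-620" ∉ cwes := fun hm => h1 (List.mem_filterMap.2 ⟨_, hm, by decide⟩)
    have nc_CWE_285 : "CWE-285" ∉ cwes := fun hm => h2 (List.mem_filterMap.2 ⟨_, hm, by decide⟩)
    have nc_CWE_862 : "CWE-862" ∉ cwes := fun hm => h2 (List.mem_filterMap.2 ⟨_, hm, by decide⟩)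
    have nc_CWE_863 : "CWE-863" ∉ cwes := fun hm => h2 (List.mem_filterMap.2 ⟨_, hm, by decide⟩)
    have nc_CWE_269 : "CWE-269" ∉ cwes := fun hm => h2 (List.mem_filterMap.2 ⟨_, hm, by decide⟩)
    have nc_CWE_284 : "CWE-284" ∉ cwes := fun hm => h2 (List.mem_filterMap.2 ⟨_, hm, by decide⟩)
    have nc_CWE_120 : "CWE-120" ∉ cwes := fun hm => h3 (List.mem_filterMap.2 ⟨_, hm, by decide⟩)
    have nc_CWE_119 : "CWE-119" ∉ cwes := fun hm => h3 (List.mem_filterMap.2 ⟨_, hm, by decide⟩)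
    have nc_CWE_121 : "CWE-121" ∉ cwes := fun hm => h3 (List.mem_filterMap.2 ⟨_, hm, by decide⟩)
    have nc_CWE_122 : "CWE-122" ∉ cwes := fun hm => h3 (List.mem_filterMap.2 ⟨_, hm, by decide⟩)
    have nc_CWE_787 : "CWE-787" ∉ cwes := fun hm => h3 (List.mem_filterMap.2 ⟨_, hm, by decide⟩)
    rw [hmin]
    simp [pvCweLoop, pvCweCategories, hcond, nc_CWE_89, nc_CWE_79, nc_CWE_77, nc_CWE_78, nc_CWE_91, nc_CWE_564, nc_CWE_287, nc_CWE_306, nc_CWE_798, nc_CWE_521, nc_CWE_620, nc_CWE_285, nc_CWE_862, nc_CWE_863, nc_CWE_269, nc_CWE_284, nc_CWE_120, nc_CWE_119, nc_CWE_121, nc_CWE_122, nc_CWE_787, pvCatName, pvBCats]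
  by_cases h5 : ((5 : Int)) ∈ cwes.filterMap pvKey
  · have hmin : (cwes.filterMap pvKey).min? = some 5 := by
      rw [List.min?_eq_some_iff]
      refine ⟨h5, fun j hj => ?_⟩
      have hb := pvK_bounds cwes j hj
      have ne0 : j ≠ 0 := fun e => h0 (e ▸ hj)
      have ne1 : j ≠ 1 := fun e => h1 (e ▸ hj)
      have ne2 : j ≠ 2 := fun e => h2 (e ▸ hj)
      have ne3 : j ≠ 3 := fun e => h3 (e ▸ hj)
      have ne4 : j ≠ 4 := fun e => h4 (e ▸ hj)
      omega
    have hcond : "CWE-327" ∈ cwes ∨ "CWE-328" ∈ cwes ∨ "CWE-330" ∈ cwes ∨ "CWE-331" ∈ cwes ∨ "CWE-347" ∈ cwes := by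
      rcases List.mem_filterMap.1 h5 with ⟨c, hcw, hk⟩
      have hm := ((pvKeyChar c 5).1 hk).2.2
      simp [pvCodesOf, pvBCats] at hm
      rcases hm with rfl|rfl|rfl|rfl|rfl <;> tauto
    have nc_CWE_89 : "CWE-89" ∉ cwes := fun hm => h0 (List.mem_filterMap.2 ⟨_, hm, by decide⟩)
    have nc_CWE_79 : "CWE-79" ∉ cwes := fun hm => h0 (List.mem_filterMap.2 ⟨_, hm, by decide⟩)
    have nc_CWE_77 : "CWE-77" ∉ cwes := fun hm => h0 (List.mem_filterMap.2 ⟨_, hm, by decide⟩)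
    have nc_CWE_78 : "CWE-78" ∉ cwes := fun hm => h0 (List.mem_filterMap.2 ⟨_, hm, by decide⟩)
    have nc_CWE_91 : "CWE-91" ∉ cwes := fun hm => h0 (List.mem_filterMap.2 ⟨_, hm, by decide⟩)
    have nc_CWE_564 : "CWE-564" ∉ cwes := fun hm => h0 (List.mem_filterMap.2 ⟨_, hm, by decide⟩)
    have nc_CWE_287 : "CWE-287" ∉ cwes := fun hm => h1 (List.mem_filterMap.2 ⟨_, hm, by decide⟩)
    have nc_CWE_306 : "CWE-306" ∉ cwes := fun hm => h1 (List.mem_filterMap.2 ⟨_, hm, by decide⟩)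
    have nc_CWE_798 : "CWE-798" ∉ cwes := fun hm => h1 (List.mem_filterMap.2 ⟨_, hm, by decide⟩)
    have nc_CWE_521 : "CWE-521" ∉ cwes := fun hm => h1 (List.mem_filterMap.2 ⟨_, hm, by decide⟩)
    have nc_CWE_620 : "CWE-620" ∉ cwes := fun hm => h1 (List.mem_filterMap.2 ⟨_, hm, by decide⟩)
    have nc_CWE_285 : "CWE-285" ∉ cwes := fun hm => h2 (List.mem_filterMap.2 ⟨_, hm, by decide⟩)
    have nc_CWE_862 : "CWE-862" ∉ cwes := fun hm => h2 (List.mem_filterMap.2 ⟨_, hm, by decide⟩)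
    have nc_CWE_863 : "CWE-863" ∉ cwes := fun hm => h2 (List.mem_filterMap.2 ⟨_, hm, by decide⟩)
    have nc_CWE_269 : "CWE-269" ∉ cwes := fun hm => h2 (List.mem_filterMap.2 ⟨_, hm, by decide⟩)
    have nc_CWE_284 : "CWE-284" ∉ cwes := fun hm => h2 (List.mem_filterMap.2 ⟨_, hm, by decide⟩)
    have nc_CWE_120 : "CWE-120" ∉ cwes := fun hm => h3 (List.mem_filterMap.2 ⟨_, hm, by decide⟩)
    have nc_CWE_119 : "CWE-119" ∉ cwes := fun hm => h3 (List.mem_filterMap.2 ⟨_, hm, by decide⟩)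
    have nc_CWE_121 : "CWE-121" ∉ cwes := fun hm => h3 (List.mem_filterMap.2 ⟨_, hm, by decide⟩)
    have nc_CWE_122 : "CWE-122" ∉ cwes := fun hm => h3 (List.mem_filterMap.2 ⟨_, hm, by decide⟩)
    have nc_CWE_787 : "CWE-787" ∉ cwes := fun hm => h3 (List.mem_filterMap.2 ⟨_, hm, by decide⟩)
    have nc_CWE_200 : "CWE-200" ∉ cwes := fun hm => h4 (List.mem_filterMap.2 ⟨_, hm, by decide⟩)
    have nc_CWE_209 : "CWE-209" ∉ cwes := fun hm => h4 (List.mem_filterMap.2 ⟨_, hm, by decide⟩)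
    have nc_CWE_215 : "CWE-215" ∉ cwes := fun hm => h4 (List.mem_filterMap.2 ⟨_, hm, by decide⟩)
    have nc_CWE_532 : "CWE-532" ∉ cwes := fun hm => h4 (List.mem_filterMap.2 ⟨_, hm, by decide⟩)
    have nc_CWE_538 : "CWE-538" ∉ cwes := fun hm => h4 (List.mem_filterMap.2 ⟨_, hm, by decide⟩)
    rw [hmin]
    simp [pvCweLoop, pvCweCategories, hcond, nc_CWE_89, nc_CWE_79, nc_CWE_77, nc_CWE_78, nc_CWE_91, nc_CWE_564, nc_CWE_287, nc_CWE_306, nc_CWE_798, nc_CWE_521, nc_CWE_620, nc_CWE_285, nc_CWE_862, nc_CWE_863, nc_CWE_269, nc_CWE_284, nc_CWE_120, nc_CWE_119, nc_CWE_121, nc_CWE_122, nc_CWE_787, nc_CWE_200, nc_CWE_209, nc_CWE_215, nc_CWE_532, nc_CWE_538, pvCatName, pvBCats]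
  by_cases h6 : ((6 : Int)) ∈ cwes.filterMap pvKey
  · have hmin : (cwes.filterMap pvKey).min? = some 6 := by
      rw [List.min?_eq_some_iff]
      refine ⟨h6, fun j hj => ?_⟩
      have hb := pvK_bounds cwes j hj
      have ne0 : j ≠ 0 := fun e => h0 (e ▸ hj)
      have ne1 : j ≠ 1 := fun e => h1 (e ▸ hj)
      have ne2 : j ≠ 2 := fun e => h2 (e ▸ hj)
      have ne3 : j ≠ 3 := fun e => h3 (e ▸ hj)
      have ne4 : j ≠ 4 := fun e => h4 (e ▸ hj)
      have ne5 : j ≠ 5 := fun e => h5 (e ▸ hj)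
      omega
    have hcond : "CWE-20" ∈ cwes ∨ "CWE-74" ∈ cwes ∨ "CWE-129" ∈ cwes ∨ "CWE-190" ∈ cwes ∨ "CWE-22" ∈ cwes := by
      rcases List.mem_filterMap.1 h6 with ⟨c, hcw, hk⟩
      have hm := ((pvKeyChar c 6).1 hk).2.2
      simp [pvCodesOf, pvBCats] at hm
      rcases hm with rfl|rfl|rfl|rfl|rfl <;> tauto
    have nc_CWE_89 : "CWE-89" ∉ cwes := fun hm => h0 (List.mem_filterMap.2 ⟨_, hm, by decide⟩)
    have nc_CWE_79 : "CWE-79" ∉ cwes := fun hm => h0 (List.mem_filterMap.2 ⟨_, hm, by decide⟩)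
    have nc_CWE_77 : "CWE-77" ∉ cwes := fun hm => h0 (List.mem_filterMap.2 ⟨_, hm, by decide⟩)
    have nc_CWE_78 : "CWE-78" ∉ cwes := fun hm => h0 (List.mem_filterMap.2 ⟨_, hm, by decide⟩)
    have nc_CWE_91 : "CWE-91" ∉ cwes := fun hm => h0 (List.mem_filterMap.2 ⟨_, hm, by decide⟩)
    have nc_CWE_564 : "CWE-564" ∉ cwes := fun hm => h0 (List.mem_filterMap.2 ⟨_, hm, by decide⟩)
    have nc_CWE_287 : "CWE-287" ∉ cwes := fun hm => h1 (List.mem_filterMap.2 ⟨_, hm, by decide⟩)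
    have nc_CWE_306 : "CWE-306" ∉ cwes := fun hm => h1 (List.mem_filterMap.2 ⟨_, hm, by decide⟩)
    have nc_CWE_798 : "CWE-798" ∉ cwes := fun hm => h1 (List.mem_filterMap.2 ⟨_, hm, by decide⟩)
    have nc_CWE_521 : "CWE-521" ∉ cwes := fun hm => h1 (List.mem_filterMap.2 ⟨_, hm, by decide⟩)
    have nc_CWE_620 : "CWE-620" ∉ cwes := fun hm => h1 (List.mem_filterMap.2 ⟨_, hm, by decide⟩)
    have nc_CWE_285 : "CWE-285" ∉ cwes := fun hm => h2 (List.mem_filterMap.2 ⟨_, hm, by decide⟩)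
    have nc_CWE_862 : "CWE-862" ∉ cwes := fun hm => h2 (List.mem_filterMap.2 ⟨_, hm, by decide⟩)
    have nc_CWE_863 : "CWE-863" ∉ cwes := fun hm => h2 (List.mem_filterMap.2 ⟨_, hm, by decide⟩)
    have nc_CWE_269 : "CWE-269" ∉ cwes := fun hm => h2 (List.mem_filterMap.2 ⟨_, hm, by decide⟩)
    have nc_CWE_284 : "CWE-284" ∉ cwes := fun hm => h2 (List.mem_filterMap.2 ⟨_, hm, by decide⟩)
    have nc_CWE_120 : "CWE-120" ∉ cwes := fun hm => h3 (List.mem_filterMap.2 ⟨_, hm, by decide⟩)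
    have nc_CWE_119 : "CWE-119" ∉ cwes := fun hm => h3 (List.mem_filterMap.2 ⟨_, hm, by decide⟩)
    have nc_CWE_121 : "CWE-121" ∉ cwes := fun hm => h3 (List.mem_filterMap.2 ⟨_, hm, by decide⟩)
    have nc_CWE_122 : "CWE-122" ∉ cwes := fun hm => h3 (List.mem_filterMap.2 ⟨_, hm, by decide⟩)
    have nc_CWE_787 : "CWE-787" ∉ cwes := fun hm => h3 (List.mem_filterMap.2 ⟨_, hm, by decide⟩)
    have nc_CWE_200 : "CWE-200" ∉ cwes := fun hm => h4 (List.mem_filterMap.2 ⟨_, hm, by decide⟩)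
    have nc_CWE_209 : "CWE-209" ∉ cwes := fun hm => h4 (List.mem_filterMap.2 ⟨_, hm, by decide⟩)
    have nc_CWE_215 : "CWE-215" ∉ cwes := fun hm => h4 (List.mem_filterMap.2 ⟨_, hm, by decide⟩)
    have nc_CWE_532 : "CWE-532" ∉ cwes := fun hm => h4 (List.mem_filterMap.2 ⟨_, hm, by decide⟩)
    have nc_CWE_538 : "CWE-538" ∉ cwes := fun hm => h4 (List.mem_filterMap.2 ⟨_, hm, by decide⟩)
    have nc_CWE_327 : "CWE-327" ∉ cwes := fun hm => h5 (List.mem_filterMap.2 ⟨_, hm, by decide⟩)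
    have nc_CWE_328 : "CWE-328" ∉ cwes := fun hm => h5 (List.mem_filterMap.2 ⟨_, hm, by decide⟩)
    have nc_CWE_330 : "CWE-330" ∉ cwes := fun hm => h5 (List.mem_filterMap.2 ⟨_, hm, by decide⟩)
    have nc_CWE_331 : "CWE-331" ∉ cwes := fun hm => h5 (List.mem_filterMap.2 ⟨_, hm, by decide⟩)
    have nc_CWE_347 : "CWE-347" ∉ cwes := fun hm => h5 (List.mem_filterMap.2 ⟨_, hm, by decide⟩)
    rw [hmin]
    simp [pvCweLoop, pvCweCategories, hcond, nc_CWE_89, nc_CWE_79, nc_CWE_77, nc_CWE_78, nc_CWE_91, nc_CWE_564, nc_CWE_287, nc_CWE_306, nc_CWE_798, nc_CWE_521, nc_CWE_620, nc_CWE_285, nc_CWE_862, nc_CWE_863, nc_CWE_269, nc_CWE_284, nc_CWE_120, nc_CWE_119, nc_CWE_121, nc_CWE_122, nc_CWE_787, nc_CWE_200, nc_CWE_209, nc_CWE_215, nc_CWE_532, nc_CWE_538, nc_CWE_327, nc_CWE_328, nc_CWE_330, nc_CWE_331, nc_CWE_347, pvCatName, pvBCats]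
  by_cases h7 : ((7 : Int)) ∈ cwes.filterMap pvKey
  · have hmin : (cwes.filterMap pvKey).min? = some 7 := by
      rw [List.min?_eq_some_iff]
      refine ⟨h7, fun j hj => ?_⟩
      have hb := pvK_bounds cwes j hj
      have ne0 : j ≠ 0 := fun e => h0 (e ▸ hj)
      have ne1 : j ≠ 1 := fun e => h1 (e ▸ hj)
      have ne2 : j ≠ 2 := fun e => h2 (e ▸ hj)
      have ne3 : j ≠ 3 := fun e => h3 (e ▸ hj)
      have ne4 : j ≠ 4 := fun e => h4 (e ▸ hj)
      have ne5 : j ≠ 5 := fun e => h5 (e ▸ hj)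
      have ne6 : j ≠ 6 := fun e => h6 (e ▸ hj)
      omega
    have hcond : "CWE-362" ∈ cwes ∨ "CWE-367" ∈ cwes ∨ "CWE-364" ∈ cwes ∨ "CWE-366" ∈ cwes ∨ "CWE-368" ∈ cwes := by
      rcases List.mem_filterMap.1 h7 with ⟨c, hcw, hk⟩
      have hm := ((pvKeyChar c 7).1 hk).2.2
      simp [pvCodesOf, pvBCats] at hm
      rcases hm with rfl|rfl|rfl|rfl|rfl <;> tauto
    have nc_CWE_89 : "CWE-89" ∉ cwes := fun hm => h0 (List.mem_filterMap.2 ⟨_, hm, by decide⟩)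
    have nc_CWE_79 : "CWE-79" ∉ cwes := fun hm => h0 (List.mem_filterMap.2 ⟨_, hm, by decide⟩)
    have nc_CWE_77 : "CWE-77" ∉ cwes := fun hm => h0 (List.mem_filterMap.2 ⟨_, hm, by decide⟩)
    have nc_CWE_78 : "CWE-78" ∉ cwes := fun hm => h0 (List.mem_filterMap.2 ⟨_, hm, by decide⟩)
    have nc_CWE_91 : "CWE-91" ∉ cwes := fun hm => h0 (List.mem_filterMap.2 ⟨_, hm, by decide⟩)
    have nc_CWE_564 : "CWE-564" ∉ cwes := fun hm => h0 (List.mem_filterMap.2 ⟨_, hm, by decide⟩)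
    have nc_CWE_287 : "CWE-287" ∉ cwes := fun hm => h1 (List.mem_filterMap.2 ⟨_, hm, by decide⟩)
    have nc_CWE_306 : "CWE-306" ∉ cwes := fun hm => h1 (List.mem_filterMap.2 ⟨_, hm, by decide⟩)
    have nc_CWE_798 : "CWE-798" ∉ cwes := fun hm => h1 (List.mem_filterMap.2 ⟨_, hm, by decide⟩)
    have nc_CWE_521 : "CWE-521" ∉ cwes := fun hm => h1 (List.mem_filterMap.2 ⟨_, hm, by decide⟩)
    have nc_CWE_620 : "CWE-620" ∉ cwes := fun hm => h1 (List.mem_filterMap.2 ⟨_, hm, by decide⟩)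
    have nc_CWE_285 : "CWE-285" ∉ cwes := fun hm => h2 (List.mem_filterMap.2 ⟨_, hm, by decide⟩)
    have nc_CWE_862 : "CWE-862" ∉ cwes := fun hm => h2 (List.mem_filterMap.2 ⟨_, hm, by decide⟩)
    have nc_CWE_863 : "CWE-863" ∉ cwes := fun hm => h2 (List.mem_filterMap.2 ⟨_, hm, by decide⟩)
    have nc_CWE_269 : "CWE-269" ∉ cwes := fun hm => h2 (List.mem_filterMap.2 ⟨_, hm, by decide⟩)
    have nc_CWE_284 : "CWE-284" ∉ cwes := fun hm => h2 (List.mem_filterMap.2 ⟨_, hm, by decide⟩)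
    have nc_CWE_120 : "CWE-120" ∉ cwes := fun hm => h3 (List.mem_filterMap.2 ⟨_, hm, by decide⟩)
    have nc_CWE_119 : "CWE-119" ∉ cwes := fun hm => h3 (List.mem_filterMap.2 ⟨_, hm, by decide⟩)
    have nc_CWE_121 : "CWE-121" ∉ cwes := fun hm => h3 (List.mem_filterMap.2 ⟨_, hm, by decide⟩)
    have nc_CWE_122 : "CWE-122" ∉ cwes := fun hm => h3 (List.mem_filterMap.2 ⟨_, hm, by decide⟩)
    have nc_CWE_787 : "CWE-787" ∉ cwes := fun hm => h3 (List.mem_filterMap.2 ⟨_, hm, by decide⟩)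
    have nc_CWE_200 : "CWE-200" ∉ cwes := fun hm => h4 (List.mem_filterMap.2 ⟨_, hm, by decide⟩)
    have nc_CWE_209 : "CWE-209" ∉ cwes := fun hm => h4 (List.mem_filterMap.2 ⟨_, hm, by decide⟩)
    have nc_CWE_215 : "CWE-215" ∉ cwes := fun hm => h4 (List.mem_filterMap.2 ⟨_, hm, by decide⟩)
    have nc_CWE_532 : "CWE-532" ∉ cwes := fun hm => h4 (List.mem_filterMap.2 ⟨_, hm, by decide⟩)
    have nc_CWE_538 : "CWE-538" ∉ cwes := fun hm => h4 (List.mem_filterMap.2 ⟨_, hm, by decide⟩)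
    have nc_CWE_327 : "CWE-327" ∉ cwes := fun hm => h5 (List.mem_filterMap.2 ⟨_, hm, by decide⟩)
    have nc_CWE_328 : "CWE-328" ∉ cwes := fun hm => h5 (List.mem_filterMap.2 ⟨_, hm, by decide⟩)
    have nc_CWE_330 : "CWE-330" ∉ cwes := fun hm => h5 (List.mem_filterMap.2 ⟨_, hm, by decide⟩)
    have nc_CWE_331 : "CWE-331" ∉ cwes := fun hm => h5 (List.mem_filterMap.2 ⟨_, hm, by decide⟩)
    have nc_CWE_347 : "CWE-347" ∉ cwes := fun hm => h5 (List.mem_filterMap.2 ⟨_, hm, by decide⟩)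
    have nc_CWE_20 : "CWE-20" ∉ cwes := fun hm => h6 (List.mem_filterMap.2 ⟨_, hm, by decide⟩)
    have nc_CWE_74 : "CWE-74" ∉ cwes := fun hm => h6 (List.mem_filterMap.2 ⟨_, hm, by decide⟩)
    have nc_CWE_129 : "CWE-129" ∉ cwes := fun hm => h6 (List.mem_filterMap.2 ⟨_, hm, by decide⟩)
    have nc_CWE_190 : "CWE-190" ∉ cwes := fun hm => h6 (List.mem_filterMap.2 ⟨_, hm, by decide⟩)
    have nc_CWE_22 : "CWE-22" ∉ cwes := fun hm => h6 (List.mem_filterMap.2 ⟨_, hm, by decide⟩)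
    rw [hmin]
    simp [pvCweLoop, pvCweCategories, hcond, nc_CWE_89, nc_CWE_79, nc_CWE_77, nc_CWE_78, nc_CWE_91, nc_CWE_564, nc_CWE_287, nc_CWE_306, nc_CWE_798, nc_CWE_521, nc_CWE_620, nc_CWE_285, nc_CWE_862, nc_CWE_863, nc_CWE_269, nc_CWE_284, nc_CWE_120, nc_CWE_119, nc_CWE_121, nc_CWE_122, nc_CWE_787, nc_CWE_200, nc_CWE_209, nc_CWE_215, nc_CWE_532, nc_CWE_538, nc_CWE_327, nc_CWE_328, nc_CWE_330, nc_CWE_331, nc_CWE_347, nc_CWE_20, nc_CWE_74, nc_CWE_129, nc_CWE_190, nc_CWE_22, pvCatName, pvBCats]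
  by_cases h8 : ((8 : Int)) ∈ cwes.filterMap pvKey
  · have hmin : (cwes.filterMap pvKey).min? = some 8 := by
      rw [List.min?_eq_some_iff]
      refine ⟨h8, fun j hj => ?_⟩
      have hb := pvK_bounds cwes j hj
      have ne0 : j ≠ 0 := fun e => h0 (e ▸ hj)
      have ne1 : j ≠ 1 := fun e => h1 (e ▸ hj)
      have ne2 : j ≠ 2 := fun e => h2 (e ▸ hj)
      have ne3 : j ≠ 3 := fun e => h3 (e ▸ hj)
      have ne4 : j ≠ 4 := fun e => h4 (e ▸ hj)
      have ne5 : j ≠ 5 := fun e => h5 (e ▸ hj)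
      have ne6 : j ≠ 6 := fun e => h6 (e ▸ hj)
      have ne7 : j ≠ 7 := fun e => h7 (e ▸ hj)
      omega
    have hcond : "CWE-401" ∈ cwes ∨ "CWE-402" ∈ cwes ∨ "CWE-404" ∈ cwes ∨ "CWE-415" ∈ cwes ∨ "CWE-416" ∈ cwes := by
      rcases List.mem_filterMap.1 h8 with ⟨c, hcw, hk⟩
      have hm := ((pvKeyChar c 8).1 hk).2.2
      simp [pvCodesOf, pvBCats] at hm
      rcases hm with rfl|rfl|rfl|rfl|rfl <;> tauto
    have nc_CWE_89 : "CWE-89" ∉ cwes := fun hm => h0 (List.mem_filterMap.2 ⟨_, hm, by decide⟩)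
    have nc_CWE_79 : "CWE-79" ∉ cwes := fun hm => h0 (List.mem_filterMap.2 ⟨_, hm, by decide⟩)
    have nc_CWE_77 : "CWE-77" ∉ cwes := fun hm => h0 (List.mem_filterMap.2 ⟨_, hm, by decide⟩)
    have nc_CWE_78 : "CWE-78" ∉ cwes := fun hm => h0 (List.mem_filterMap.2 ⟨_, hm, by decide⟩)
    have nc_CWE_91 : "CWE-91" ∉ cwes := fun hm => h0 (List.mem_filterMap.2 ⟨_, hm, by decide⟩)
    have nc_CWE_564 : "CWE-564" ∉ cwes := fun hm => h0 (List.mem_filterMap.2 ⟨_, hm, by decide⟩)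
    have nc_CWE_287 : "CWE-287" ∉ cwes := fun hm => h1 (List.mem_filterMap.2 ⟨_, hm, by decide⟩)
    have nc_CWE_306 : "CWE-306" ∉ cwes := fun hm => h1 (List.mem_filterMap.2 ⟨_, hm, by decide⟩)
    have nc_CWE_798 : "CWE-798" ∉ cwes := fun hm => h1 (List.mem_filterMap.2 ⟨_, hm, by decide⟩)
    have nc_CWE_521 : "CWE-521" ∉ cwes := fun hm => h1 (List.mem_filterMap.2 ⟨_, hm, by decide⟩)
    have nc_CWE_620 : "CWE-620" ∉ cwes := fun hm => h1 (List.mem_filterMap.2 ⟨_, hm, by decide⟩)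
    have nc_CWE_285 : "CWE-285" ∉ cwes := fun hm => h2 (List.mem_filterMap.2 ⟨_, hm, by decide⟩)
    have nc_CWE_862 : "CWE-862" ∉ cwes := fun hm => h2 (List.mem_filterMap.2 ⟨_, hm, by decide⟩)
    have nc_CWE_863 : "CWE-863" ∉ cwes := fun hm => h2 (List.mem_filterMap.2 ⟨_, hm, by decide⟩)
    have nc_CWE_269 : "CWE-269" ∉ cwes := fun hm => h2 (List.mem_filterMap.2 ⟨_, hm, by decide⟩)
    have nc_CWE_284 : "CWE-284" ∉ cwes := fun hm => h2 (List.mem_filterMap.2 ⟨_, hm, by decide⟩)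
    have nc_CWE_120 : "CWE-120" ∉ cwes := fun hm => h3 (List.mem_filterMap.2 ⟨_, hm, by decide⟩)
    have nc_CWE_119 : "CWE-119" ∉ cwes := fun hm => h3 (List.mem_filterMap.2 ⟨_, hm, by decide⟩)
    have nc_CWE_121 : "CWE-121" ∉ cwes := fun hm => h3 (List.mem_filterMap.2 ⟨_, hm, by decide⟩)
    have nc_CWE_122 : "CWE-122" ∉ cwes := fun hm => h3 (List.mem_filterMap.2 ⟨_, hm, by decide⟩)
    have nc_CWE_787 : "CWE-787" ∉ cwes := fun hm => h3 (List.mem_filterMap.2 ⟨_, hm, by decide⟩)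
    have nc_CWE_200 : "CWE-200" ∉ cwes := fun hm => h4 (List.mem_filterMap.2 ⟨_, hm, by decide⟩)
    have nc_CWE_209 : "CWE-209" ∉ cwes := fun hm => h4 (List.mem_filterMap.2 ⟨_, hm, by decide⟩)
    have nc_CWE_215 : "CWE-215" ∉ cwes := fun hm => h4 (List.mem_filterMap.2 ⟨_, hm, by decide⟩)
    have nc_CWE_532 : "CWE-532" ∉ cwes := fun hm => h4 (List.mem_filterMap.2 ⟨_, hm, by decide⟩)
    have nc_CWE_538 : "CWE-538" ∉ cwes := fun hm => h4 (List.mem_filterMap.2 ⟨_, hm, by decide⟩)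
    have nc_CWE_327 : "CWE-327" ∉ cwes := fun hm => h5 (List.mem_filterMap.2 ⟨_, hm, by decide⟩)
    have nc_CWE_328 : "CWE-328" ∉ cwes := fun hm => h5 (List.mem_filterMap.2 ⟨_, hm, by decide⟩)
    have nc_CWE_330 : "CWE-330" ∉ cwes := fun hm => h5 (List.mem_filterMap.2 ⟨_, hm, by decide⟩)
    have nc_CWE_331 : "CWE-331" ∉ cwes := fun hm => h5 (List.mem_filterMap.2 ⟨_, hm, by decide⟩)
    have nc_CWE_347 : "CWE-347" ∉ cwes := fun hm => h5 (List.mem_filterMap.2 ⟨_, hm, by decide⟩)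
    have nc_CWE_20 : "CWE-20" ∉ cwes := fun hm => h6 (List.mem_filterMap.2 ⟨_, hm, by decide⟩)
    have nc_CWE_74 : "CWE-74" ∉ cwes := fun hm => h6 (List.mem_filterMap.2 ⟨_, hm, by decide⟩)
    have nc_CWE_129 : "CWE-129" ∉ cwes := fun hm => h6 (List.mem_filterMap.2 ⟨_, hm, by decide⟩)
    have nc_CWE_190 : "CWE-190" ∉ cwes := fun hm => h6 (List.mem_filterMap.2 ⟨_, hm, by decide⟩)
    have nc_CWE_22 : "CWE-22" ∉ cwes := fun hm => h6 (List.mem_filterMap.2 ⟨_, hm, by decide⟩)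
    have nc_CWE_362 : "CWE-362" ∉ cwes := fun hm => h7 (List.mem_filterMap.2 ⟨_, hm, by decide⟩)
    have nc_CWE_367 : "CWE-367" ∉ cwes := fun hm => h7 (List.mem_filterMap.2 ⟨_, hm, by decide⟩)
    have nc_CWE_364 : "CWE-364" ∉ cwes := fun hm => h7 (List.mem_filterMap.2 ⟨_, hm, by decide⟩)
    have nc_CWE_366 : "CWE-366" ∉ cwes := fun hm => h7 (List.mem_filterMap.2 ⟨_, hm, by decide⟩)
    have nc_CWE_368 : "CWE-368" ∉ cwes := fun hm => h7 (List.mem_filterMap.2 ⟨_, hm, by decide⟩)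
    rw [hmin]
    simp [pvCweLoop, pvCweCategories, hcond, nc_CWE_89, nc_CWE_79, nc_CWE_77, nc_CWE_78, nc_CWE_91, nc_CWE_564, nc_CWE_287, nc_CWE_306, nc_CWE_798, nc_CWE_521, nc_CWE_620, nc_CWE_285, nc_CWE_862, nc_CWE_863, nc_CWE_269, nc_CWE_284, nc_CWE_120, nc_CWE_119, nc_CWE_121, nc_CWE_122, nc_CWE_787, nc_CWE_200, nc_CWE_209, nc_CWE_215, nc_CWE_532, nc_CWE_538, nc_CWE_327, nc_CWE_328, nc_CWE_330, nc_CWE_331, nc_CWE_347, nc_CWE_20, nc_CWE_74, nc_CWE_129, nc_CWE_190, nc_CWE_22, nc_CWE_362, nc_CWE_367, nc_CWE_364, nc_CWE_366, nc_CWE_368, pvCatName, pvBCats]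
  have nc_CWE_89 : "CWE-89" ∉ cwes := fun hm => h0 (List.mem_filterMap.2 ⟨_, hm, by decide⟩)
  have nc_CWE_79 : "CWE-79" ∉ cwes := fun hm => h0 (List.mem_filterMap.2 ⟨_, hm, by decide⟩)
  have nc_CWE_77 : "CWE-77" ∉ cwes := fun hm => h0 (List.mem_filterMap.2 ⟨_, hm, by decide⟩)
  have nc_CWE_78 : "CWE-78" ∉ cwes := fun hm => h0 (List.mem_filterMap.2 ⟨_, hm, by decide⟩)
  have nc_CWE_91 : "CWE-91" ∉ cwes := fun hm => h0 (List.mem_filterMap.2 ⟨_, hm, by decide⟩)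
  have nc_CWE_564 : "CWE-564" ∉ cwes := fun hm => h0 (List.mem_filterMap.2 ⟨_, hm, by decide⟩)
  have nc_CWE_287 : "CWE-287" ∉ cwes := fun hm => h1 (List.mem_filterMap.2 ⟨_, hm, by decide⟩)
  have nc_CWE_306 : "CWE-306" ∉ cwes := fun hm => h1 (List.mem_filterMap.2 ⟨_, hm, by decide⟩)
  have nc_CWE_798 : "CWE-798" ∉ cwes := fun hm => h1 (List.mem_filterMap.2 ⟨_, hm, by decide⟩)
  have nc_CWE_521 : "CWE-521" ∉ cwes := fun hm => h1 (List.mem_filterMap.2 ⟨_, hm, by decide⟩)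
  have nc_CWE_620 : "CWE-620" ∉ cwes := fun hm => h1 (List.mem_filterMap.2 ⟨_, hm, by decide⟩)
  have nc_CWE_285 : "CWE-285" ∉ cwes := fun hm => h2 (List.mem_filterMap.2 ⟨_, hm, by decide⟩)
  have nc_CWE_862 : "CWE-862" ∉ cwes := fun hm => h2 (List.mem_filterMap.2 ⟨_, hm, by decide⟩)
  have nc_CWE_863 : "CWE-863" ∉ cwes := fun hm => h2 (List.mem_filterMap.2 ⟨_, hm, by decide⟩)
  have nc_CWE_269 : "CWE-269" ∉ cwes := fun hm => h2 (List.mem_filterMap.2 ⟨_, hm, by decide⟩)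
  have nc_CWE_284 : "CWE-284" ∉ cwes := fun hm => h2 (List.mem_filterMap.2 ⟨_, hm, by decide⟩)
  have nc_CWE_120 : "CWE-120" ∉ cwes := fun hm => h3 (List.mem_filterMap.2 ⟨_, hm, by decide⟩)
  have nc_CWE_119 : "CWE-119" ∉ cwes := fun hm => h3 (List.mem_filterMap.2 ⟨_, hm, by decide⟩)
  have nc_CWE_121 : "CWE-121" ∉ cwes := fun hm => h3 (List.mem_filterMap.2 ⟨_, hm, by decide⟩)
  have nc_CWE_122 : "CWE-122" ∉ cwes := fun hm => h3 (List.mem_filterMap.2 ⟨_, hm, by decide⟩)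
  have nc_CWE_787 : "CWE-787" ∉ cwes := fun hm => h3 (List.mem_filterMap.2 ⟨_, hm, by decide⟩)
  have nc_CWE_200 : "CWE-200" ∉ cwes := fun hm => h4 (List.mem_filterMap.2 ⟨_, hm, by decide⟩)
  have nc_CWE_209 : "CWE-209" ∉ cwes := fun hm => h4 (List.mem_filterMap.2 ⟨_, hm, by decide⟩)
  have nc_CWE_215 : "CWE-215" ∉ cwes := fun hm => h4 (List.mem_filterMap.2 ⟨_, hm, by decide⟩)
  have nc_CWE_532 : "CWE-532" ∉ cwes := fun hm => h4 (List.mem_filterMap.2 ⟨_, hm, by decide⟩)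
  have nc_CWE_538 : "CWE-538" ∉ cwes := fun hm => h4 (List.mem_filterMap.2 ⟨_, hm, by decide⟩)
  have nc_CWE_327 : "CWE-327" ∉ cwes := fun hm => h5 (List.mem_filterMap.2 ⟨_, hm, by decide⟩)
  have nc_CWE_328 : "CWE-328" ∉ cwes := fun hm => h5 (List.mem_filterMap.2 ⟨_, hm, by decide⟩)
  have nc_CWE_330 : "CWE-330" ∉ cwes := fun hm => h5 (List.mem_filterMap.2 ⟨_, hm, by decide⟩)
  have nc_CWE_331 : "CWE-331" ∉ cwes := fun hm => h5 (List.mem_filterMap.2 ⟨_, hm, by decide⟩)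
  have nc_CWE_347 : "CWE-347" ∉ cwes := fun hm => h5 (List.mem_filterMap.2 ⟨_, hm, by decide⟩)
  have nc_CWE_20 : "CWE-20" ∉ cwes := fun hm => h6 (List.mem_filterMap.2 ⟨_, hm, by decide⟩)
  have nc_CWE_74 : "CWE-74" ∉ cwes := fun hm => h6 (List.mem_filterMap.2 ⟨_, hm, by decide⟩)
  have nc_CWE_129 : "CWE-129" ∉ cwes := fun hm => h6 (List.mem_filterMap.2 ⟨_, hm, by decide⟩)
  have nc_CWE_190 : "CWE-190" ∉ cwes := fun hm => h6 (List.mem_filterMap.2 ⟨_, hm, by decide⟩)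
  have nc_CWE_22 : "CWE-22" ∉ cwes := fun hm => h6 (List.mem_filterMap.2 ⟨_, hm, by decide⟩)
  have nc_CWE_362 : "CWE-362" ∉ cwes := fun hm => h7 (List.mem_filterMap.2 ⟨_, hm, by decide⟩)
  have nc_CWE_367 : "CWE-367" ∉ cwes := fun hm => h7 (List.mem_filterMap.2 ⟨_, hm, by decide⟩)
  have nc_CWE_364 : "CWE-364" ∉ cwes := fun hm => h7 (List.mem_filterMap.2 ⟨_, hm, by decide⟩)
  have nc_CWE_366 : "CWE-366" ∉ cwes := fun hm => h7 (List.mem_filterMap.2 ⟨_, hm, by decide⟩)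
  have nc_CWE_368 : "CWE-368" ∉ cwes := fun hm => h7 (List.mem_filterMap.2 ⟨_, hm, by decide⟩)
  have nc_CWE_401 : "CWE-401" ∉ cwes := fun hm => h8 (List.mem_filterMap.2 ⟨_, hm, by decide⟩)
  have nc_CWE_402 : "CWE-402" ∉ cwes := fun hm => h8 (List.mem_filterMap.2 ⟨_, hm, by decide⟩)
  have nc_CWE_404 : "CWE-404" ∉ cwes := fun hm => h8 (List.mem_filterMap.2 ⟨_, hm, by decide⟩)
  have nc_CWE_415 : "CWE-415" ∉ cwes := fun hm => h8 (List.mem_filterMap.2 ⟨_, hm, by decide⟩)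
  have nc_CWE_416 : "CWE-416" ∉ cwes := fun hm => h8 (List.mem_filterMap.2 ⟨_, hm, by decide⟩)
  have hnil : cwes.filterMap pvKey = [] := by
    rw [List.eq_nil_iff_forall_not_mem]
    intro j hj
    have hb := pvK_bounds cwes j hj
    have ne0 : j ≠ 0 := fun e => h0 (e ▸ hj)
    have ne1 : j ≠ 1 := fun e => h1 (e ▸ hj)
    have ne2 : j ≠ 2 := fun e => h2 (e ▸ hj)
    have ne3 : j ≠ 3 := fun e => h3 (e ▸ hj)
    have ne4 : j ≠ 4 := fun e => h4 (e ▸ hj)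
    have ne5 : j ≠ 5 := fun e => h5 (e ▸ hj)
    have ne6 : j ≠ 6 := fun e => h6 (e ▸ hj)
    have ne7 : j ≠ 7 := fun e => h7 (e ▸ hj)
    have ne8 : j ≠ 8 := fun e => h8 (e ▸ hj)
    omega
  rw [hnil]
  simp [pvCweLoop, pvCweCategories, nc_CWE_89, nc_CWE_79, nc_CWE_77, nc_CWE_78, nc_CWE_91, nc_CWE_564, nc_CWE_287, nc_CWE_306, nc_CWE_798, nc_CWE_521, nc_CWE_620, nc_CWE_285, nc_CWE_862, nc_CWE_863, nc_CWE_269, nc_CWE_284, nc_CWE_120, nc_CWE_119, nc_CWE_121, nc_CWE_122, nc_CWE_787, nc_CWE_200, nc_CWE_209, nc_CWE_215, nc_CWE_532, nc_CWE_538, nc_CWE_327, nc_CWE_328, nc_CWE_330, nc_CWE_331, nc_CWE_347, nc_CWE_20, nc_CWE_74, nc_CWE_129, nc_CWE_190, nc_CWE_22, nc_CWE_362, nc_CWE_367, nc_CWE_364, nc_CWE_366, nc_CWE_368, nc_CWE_401, nc_CWE_402, nc_CWE_404, nc_CWE_415, nc_CWE_416]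

-- once the keyword fold holds a hit, no later (higher-priority-index) rule replaces it
theorem pvKwFold_stay (dl : String) (b : Int × String) :
    ∀ rs : List (String × Int × String), (∀ r ∈ rs, ¬ (r.2.1 < b.1)) →
      rs.foldl (pvKwStep dl) (some b) = some b := by
  intro rs
  induction rs with
  | nil => intro _; rfl
  | cons r rest ih =>
    intro h
    rw [List.foldl_cons]
    have : pvKwStep dl (some b) r = some b := by
      unfold pvKwStep
      simp [h r List.mem_cons_self]
    rw [this]
    exact ih (fun r hr => h r (List.mem_cons_of_mem _ hr))

-- over a priority-sorted index the argmin fold is the first match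
theorem pvKwFold_find (dl : String) :
    ∀ rs : List (String × Int × String), rs.Pairwise (fun r s => r.2.1 ≤ s.2.1) →
      rs.foldl (pvKwStep dl) none = (rs.find? (fun r => PySem.Str.isIn r.1 dl)).map (·.2) := by
  intro rs
  induction rs with
  | nil => intro _; rfl
  | cons r rest ih =>
    intro hp
    rw [List.foldl_cons]
    cases h : PySem.Str.isIn r.1 dl with
    | false =>
      simp only [PySem.Str.isIn_eq] at h
      rw [List.find?_cons_of_neg (by simp [h])]
      have : pvKwStep dl none r = none := by unfold pvKwStep; simp [h]
      rw [this]
      exact ih (List.Pairwise.sublist (List.sublist_cons_self r rest) hp)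
    | true =>
      simp only [PySem.Str.isIn_eq] at h
      rw [List.find?_cons_of_pos (by simp [h])]
      have : pvKwStep dl none r = some r.2 := by unfold pvKwStep; simp [h]
      rw [this]
      exact pvKwFold_stay dl r.2 rest
        (fun s hs => not_lt.2 ((List.pairwise_cons.1 hp).1 s hs))

-- the keyword phase: A's elif chain equals B's argmin fold over the flat index
set_option maxHeartbeats 4000000 in
theorem pvPhase2 (dl : String) :
    (if ["sql injection", "sqli", "sql inject"].any (fun t => PySem.Str.isIn t dl) then "SQL Injection"
     else if ["cross-site scripting", "xss"].any (fun t => PySem.Str.isIn t dl) then "Cross-Site Scripting"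
     else if ["buffer overflow", "buffer overrun"].any (fun t => PySem.Str.isIn t dl) then "Buffer Overflow"
     else if ["denial of service", "dos", "crash"].any (fun t => PySem.Str.isIn t dl) then "Denial of Service"
     else if ["remote code execution", "rce", "code execution"].any (fun t => PySem.Str.isIn t dl) then "Remote Code Execution"
     else if ["privilege escalation", "elevation"].any (fun t => PySem.Str.isIn t dl) then "Privilege Escalation"
     else if ["information disclosure", "information leak"].any (fun t => PySem.Str.isIn t dl) then "Information Disclosure"
     else if ["authentication", "login", "credential"].any (fun t => PySem.Str.isIn t dl) then "Authentication"
     else if ["directory traversal", "path traversal"].any (fun t => PySem.Str.isIn t dl) then "Directory Traversal"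
     else if ["command injection", "shell injection"].any (fun t => PySem.Str.isIn t dl) then "Command Injection"
     else "Other Vulnerability")
    = (match pvKwIndex.foldl (pvKwStep dl) none with
       | some b => b.2
       | none => "Other Vulnerability") := by
  rw [pvKwFold_find dl pvKwIndex (by decide)]
  cases h1 : PySem.Chars.isIn ['s', 'q', 'l', ' ', 'i', 'n', 'j', 'e', 'c', 't', 'i', 'o', 'n'] dl.toList with
  | true => simp [pvKwIndex, pvKwGroups, PySem.List.enumerate, List.find?, h1]
  | false =>
    cases h2 : PySem.Chars.isIn ['s', 'q', 'l', 'i'] dl.toList with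
    | true => simp [pvKwIndex, pvKwGroups, PySem.List.enumerate, List.find?, h1, h2]
    | false =>
      cases h3 : PySem.Chars.isIn ['s', 'q', 'l', ' ', 'i', 'n', 'j', 'e', 'c', 't'] dl.toList with
      | true => simp [pvKwIndex, pvKwGroups, PySem.List.enumerate, List.find?, h1, h2, h3]
      | false =>
        cases h4 : PySem.Chars.isIn ['c', 'r', 'o', 's', 's', '-', 's', 'i', 't', 'e', ' ', 's', 'c', 'r', 'i', 'p', 't', 'i', 'n', 'g'] dl.toList with
        | true => simp [pvKwIndex, pvKwGroups, PySem.List.enumerate, List.find?, h1, h2, h3, h4]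
        | false =>
          cases h5 : PySem.Chars.isIn ['x', 's', 's'] dl.toList with
          | true => simp [pvKwIndex, pvKwGroups, PySem.List.enumerate, List.find?, h1, h2, h3, h4, h5]
          | false =>
            cases h6 : PySem.Chars.isIn ['b', 'u', 'f', 'f', 'e', 'r', ' ', 'o', 'v', 'e', 'r', 'f', 'l', 'o', 'w'] dl.toList with
            | true => simp [pvKwIndex, pvKwGroups, PySem.List.enumerate, List.find?, h1, h2, h3, h4, h5, h6]
            | false =>
              cases h7 : PySem.Chars.isIn ['b', 'u', 'f', 'f', 'e', 'r', ' ', 'o', 'v', 'e', 'r', 'r', 'u', 'n'] dl.toList with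
              | true => simp [pvKwIndex, pvKwGroups, PySem.List.enumerate, List.find?, h1, h2, h3, h4, h5, h6, h7]
              | false =>
                cases h8 : PySem.Chars.isIn ['d', 'e', 'n', 'i', 'a', 'l', ' ', 'o', 'f', ' ', 's', 'e', 'r', 'v', 'i', 'c', 'e'] dl.toList with
                | true => simp [pvKwIndex, pvKwGroups, PySem.List.enumerate, List.find?, h1, h2, h3, h4, h5, h6, h7, h8]
                | false =>
                  cases h9 : PySem.Chars.isIn ['d', 'o', 's'] dl.toList with
                  | true => simp [pvKwIndex, pvKwGroups, PySem.List.enumerate, List.find?, h1, h2, h3, h4, h5, h6, h7, h8, h9]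
                  | false =>
                    cases h10 : PySem.Chars.isIn ['c', 'r', 'a', 's', 'h'] dl.toList with
                    | true => simp [pvKwIndex, pvKwGroups, PySem.List.enumerate, List.find?, h1, h2, h3, h4, h5, h6, h7, h8, h9, h10]
                    | false =>
                      cases h11 : PySem.Chars.isIn ['r', 'e', 'm', 'o', 't', 'e', ' ', 'c', 'o', 'd', 'e', ' ', 'e', 'x', 'e', 'c', 'u', 't', 'i', 'o', 'n'] dl.toList with
                      | true => simp [pvKwIndex, pvKwGroups, PySem.List.enumerate, List.find?, h1, h2, h3, h4, h5, h6, h7, h8, h9, h10, h11]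
                      | false =>
                        cases h12 : PySem.Chars.isIn ['r', 'c', 'e'] dl.toList with
                        | true => simp [pvKwIndex, pvKwGroups, PySem.List.enumerate, List.find?, h1, h2, h3, h4, h5, h6, h7, h8, h9, h10, h11, h12]
                        | false =>
                          cases h13 : PySem.Chars.isIn ['c', 'o', 'd', 'e', ' ', 'e', 'x', 'e', 'c', 'u', 't', 'i', 'o', 'n'] dl.toList with
                          | true => simp [pvKwIndex, pvKwGroups, PySem.List.enumerate, List.find?, h1, h2, h3, h4, h5, h6, h7, h8, h9, h10, h11, h12, h13]
                          | false =>
                            cases h14 : PySem.Chars.isIn ['p', 'r', 'i', 'v', 'i', 'l', 'e', 'g', 'e', ' ', 'e', 's', 'c', 'a', 'l', 'a', 't', 'i', 'o', 'n'] dl.toList with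
                            | true => simp [pvKwIndex, pvKwGroups, PySem.List.enumerate, List.find?, h1, h2, h3, h4, h5, h6, h7, h8, h9, h10, h11, h12, h13, h14]
                            | false =>
                              cases h15 : PySem.Chars.isIn ['e', 'l', 'e', 'v', 'a', 't', 'i', 'o', 'n'] dl.toList with
                              | true => simp [pvKwIndex, pvKwGroups, PySem.List.enumerate, List.find?, h1, h2, h3, h4, h5, h6, h7, h8, h9, h10, h11, h12, h13, h14, h15]
                              | false =>
                                cases h16 : PySem.Chars.isIn ['i', 'n', 'f', 'o', 'r', 'm', 'a', 't', 'i', 'o', 'n', ' ', 'd', 'i', 's', 'c', 'l', 'o', 's', 'u', 'r', 'e'] dl.toList with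
                                | true => simp [pvKwIndex, pvKwGroups, PySem.List.enumerate, List.find?, h1, h2, h3, h4, h5, h6, h7, h8, h9, h10, h11, h12, h13, h14, h15, h16]
                                | false =>
                                  cases h17 : PySem.Chars.isIn ['i', 'n', 'f', 'o', 'r', 'm', 'a', 't', 'i', 'o', 'n', ' ', 'l', 'e', 'a', 'k'] dl.toList with
                                  | true => simp [pvKwIndex, pvKwGroups, PySem.List.enumerate, List.find?, h1, h2, h3, h4, h5, h6, h7, h8, h9, h10, h11, h12, h13, h14, h15, h16, h17]
                                  | false =>
                                    cases h18 : PySem.Chars.isIn ['a', 'u', 't', 'h', 'e', 'n', 't', 'i', 'c', 'a', 't', 'i', 'o', 'n'] dl.toList with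
                                    | true => simp [pvKwIndex, pvKwGroups, PySem.List.enumerate, List.find?, h1, h2, h3, h4, h5, h6, h7, h8, h9, h10, h11, h12, h13, h14, h15, h16, h17, h18]
                                    | false =>
                                      cases h19 : PySem.Chars.isIn ['l', 'o', 'g', 'i', 'n'] dl.toList with
                                      | true => simp [pvKwIndex, pvKwGroups, PySem.List.enumerate, List.find?, h1, h2, h3, h4, h5, h6, h7, h8, h9, h10, h11, h12, h13, h14, h15, h16, h17, h18, h19]
                                      | false =>
                                        cases h20 : PySem.Chars.isIn ['c', 'r', 'e', 'd', 'e', 'n', 't', 'i', 'a', 'l'] dl.toList with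
                                        | true => simp [pvKwIndex, pvKwGroups, PySem.List.enumerate, List.find?, h1, h2, h3, h4, h5, h6, h7, h8, h9, h10, h11, h12, h13, h14, h15, h16, h17, h18, h19, h20]
                                        | false =>
                                          cases h21 : PySem.Chars.isIn ['d', 'i', 'r', 'e', 'c', 't', 'o', 'r', 'y', ' ', 't', 'r', 'a', 'v', 'e', 'r', 's', 'a', 'l'] dl.toList with
                                          | true => simp [pvKwIndex, pvKwGroups, PySem.List.enumerate, List.find?, h1, h2, h3, h4, h5, h6, h7, h8, h9, h10, h11, h12, h13, h14, h15, h16, h17, h18, h19, h20, h21]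
                                          | false =>
                                            cases h22 : PySem.Chars.isIn ['p', 'a', 't', 'h', ' ', 't', 'r', 'a', 'v', 'e', 'r', 's', 'a', 'l'] dl.toList with
                                            | true => simp [pvKwIndex, pvKwGroups, PySem.List.enumerate, List.find?, h1, h2, h3, h4, h5, h6, h7, h8, h9, h10, h11, h12, h13, h14, h15, h16, h17, h18, h19, h20, h21, h22]
                                            | false =>
                                              cases h23 : PySem.Chars.isIn ['c', 'o', 'm', 'm', 'a', 'n', 'd', ' ', 'i', 'n', 'j', 'e', 'c', 't', 'i', 'o', 'n'] dl.toList with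
                                              | true => simp [pvKwIndex, pvKwGroups, PySem.List.enumerate, List.find?, h1, h2, h3, h4, h5, h6, h7, h8, h9, h10, h11, h12, h13, h14, h15, h16, h17, h18, h19, h20, h21, h22, h23]
                                              | false =>
                                                cases h24 : PySem.Chars.isIn ['s', 'h', 'e', 'l', 'l', ' ', 'i', 'n', 'j', 'e', 'c', 't', 'i', 'o', 'n'] dl.toList with
                                                | true => simp [pvKwIndex, pvKwGroups, PySem.List.enumerate, List.find?, h1, h2, h3, h4, h5, h6, h7, h8, h9, h10, h11, h12, h13, h14, h15, h16, h17, h18, h19, h20, h21, h22, h23, h24]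
                                                | false =>
                                                  simp [pvKwIndex, pvKwGroups, PySem.List.enumerate, List.find?, h1, h2, h3, h4, h5, h6, h7, h8, h9, h10, h11, h12, h13, h14, h15, h16, h17, h18, h19, h20, h21, h22, h23, h24]

-- ===== VERDICT (by name: the statement is the Claim_ definition above) =====
set_option maxHeartbeats 2000000 in
theorem categorize_vulnerability_spec : Claim_equal_categorize_vulnerability := by
  intro description cwes _
  unfold Spec_categorize_vulnerability
  simp only [categorize_vulnerability, categorize_vulnerability_alt]
  have hfold : cwes.foldl pvCweStep none
      = ((cwes.filterMap pvKey).min?).map (fun i => (i, pvCatName i)) := by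
    have h1 := pvFoldA cwes none
    have h2 := pvFoldB cwes none
    simpa [h2] using h1
  rw [hfold, pvCweLoop_char]
  cases hm : (cwes.filterMap pvKey).min? with
  | some m => simp
  | none => simpa using pvPhase2 (PySem.Str.lower description)
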